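-- pv_equiv track=rewrite | github.com/River-Mt/Algorithm | 프로그래머스/unrated/150368. 이모티콘 할인행사/이모티콘 할인행사.py | solution
-- ===== SOURCE A (Python) =====
-- def solution(users, emoticons):
--     answer = [0, 0]
--     perms = []
--     discounts = [10, 20, 30, 40]
--
--     def rep_perm(d, arr, n):
--         if d == n:
--             perms.append(arr)
--             return
--         for i in range(4):
--             rep_perm(d + 1, arr + [discounts[i]], n)
--
--     rep_perm(0, [], len(emoticons))
--
--     for perm in perms:
--         cnt = 0
--         credit = 0
--
--         for user in users:
--             user_credit = 0
--             d, lim = user[0], user[1]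
--
--             for i in range(len(perm)):
--                 if d <= perm[i]:
--                     user_credit += int(emoticons[i] * ((100 - perm[i])) // 100)
--
--             if user_credit >= lim:
--                 cnt += 1
--
--             else:
--                 credit += user_credit
--
--         if answer[0] < cnt:
--             answer = [cnt, credit]
--
--         elif answer[0] == cnt:
--             if answer[1] < credit:
--                 answer = [cnt, credit]
--
--
--     return answer
-- ===== SOURCE B (Python) =====
-- def solution(users, emoticons):
--     # Same answer as A; enumerates the 4^n discount assignments by integer code
--     # (no materialized perms list) and keeps a running lexicographic best.
--     n = len(emoticons)
--     best = (0, 0)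
--     for code in range(4 ** n):
--         perm = [(code // 4 ** (n - 1 - i)) % 4 * 10 + 10 for i in range(n)]
--         cnt = 0
--         credit = 0
--         for user in users:
--             uc = sum(e * (100 - p) // 100 for e, p in zip(emoticons, perm) if user[0] <= p)
--             if uc >= user[1]:
--                 cnt += 1
--             else:
--                 credit += uc
--         best = max(best, (cnt, credit))
--     return [best[0], best[1]]
-- ===== Notes on version B (the rewrite author's own statement) =====
-- stated objective: alternative
-- what changed: Replaces A's recursive rep_perm that materializes all 4^n discount assignments into a perms list (then a second pass scoring each) with a single streaming pass over integer codes 0..4^n-1, decoding each code arithmetically into its discount tuple, scoring users via a sum over zip(emoticons, perm), and keeping a running lexicographic (cnt, credit) max.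
-- outside the precondition, e.g. on solution([[40]], [100]): A raises IndexError, B raises IndexError
import Mathlib
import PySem

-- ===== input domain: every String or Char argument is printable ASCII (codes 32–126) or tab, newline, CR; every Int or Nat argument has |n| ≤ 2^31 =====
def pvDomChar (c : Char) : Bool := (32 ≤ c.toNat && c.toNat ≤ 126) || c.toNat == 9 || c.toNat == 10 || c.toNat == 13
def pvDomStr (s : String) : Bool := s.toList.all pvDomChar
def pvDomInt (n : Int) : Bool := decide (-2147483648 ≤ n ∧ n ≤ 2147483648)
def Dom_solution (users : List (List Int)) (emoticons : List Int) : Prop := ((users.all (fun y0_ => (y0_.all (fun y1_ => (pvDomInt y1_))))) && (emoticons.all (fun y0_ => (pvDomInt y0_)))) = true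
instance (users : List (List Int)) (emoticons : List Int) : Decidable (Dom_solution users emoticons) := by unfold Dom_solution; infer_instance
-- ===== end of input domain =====

-- B replaces A's materialized 4^n-entry perms table (recursive rep_perm) by streaming over
-- integer codes 0..4^n-1, decoding each code to its discount tuple and keeping a running
-- lexicographic best; per-user scoring becomes a sum over zip(emoticons, perm).
-- Equivalence of RETURN values on Pre_ (every user list has length ≥ 2; A raises IndexError otherwise).


-- ===== PORT A =====
-- rep_perm(d, arr, n): fuel = n - d; appends completed assignments in depth-first i = 0..3 order
def repPermA : Nat → List Int → List (List Int)
  | 0, arr => [arr]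
  | fuel + 1, arr =>
      ([10, 20, 30, 40] : List Int).foldl
        (fun acc x => acc ++ repPermA fuel (arr ++ [x])) []

def solution (users : List (List Int)) (emoticons : List Int) : List Int :=
  let perms := repPermA emoticons.length []
  perms.foldl (fun answer perm =>
    let s := users.foldl (fun (s : Int × Int) user =>
      let d := PySem.List.pyGetD user 0 0
      let lim := PySem.List.pyGetD user 1 0
      let uc := (PySem.List.pyRange 0 (perm.length : Int) 1).foldl (fun uc i =>
        if d ≤ PySem.List.pyGetD perm i 0 then
          uc + PySem.Int.floordiv (PySem.List.pyGetD emoticons i 0 * (100 - PySem.List.pyGetD perm i 0)) 100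
        else uc) 0
      if lim ≤ uc then (s.1 + 1, s.2) else (s.1, s.2 + uc)) ((0 : Int), (0 : Int))
    if PySem.List.pyGetD answer 0 0 < s.1 then [s.1, s.2]
    else if PySem.List.pyGetD answer 0 0 = s.1 then
      (if PySem.List.pyGetD answer 1 0 < s.2 then [s.1, s.2] else answer)
    else answer) [0, 0]

-- ===== PORT B =====
def solution_alt (users : List (List Int)) (emoticons : List Int) : List Int :=
  let n : Int := emoticons.length
  -- exponents n and n-1-i are ≥ 0 for i in range(n), so `4 ** e` is ported exactly as `4 ^ e.toNat`
  let best := (PySem.List.pyRange 0 (4 ^ n.toNat) 1).foldl (fun best code =>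
    let perm := (PySem.List.pyRange 0 n 1).map (fun i =>
      PySem.Int.mod (PySem.Int.floordiv code (4 ^ (n - 1 - i).toNat)) 4 * 10 + 10)
    let s := users.foldl (fun (s : Int × Int) user =>
      let uc := (((emoticons.zip perm).filter (fun ep => PySem.List.pyGetD user 0 0 ≤ ep.2)).map
        (fun ep => PySem.Int.floordiv (ep.1 * (100 - ep.2)) 100)).sum
      if PySem.List.pyGetD user 1 0 ≤ uc then (s.1 + 1, s.2) else (s.1, s.2 + uc))
      ((0 : Int), (0 : Int))
    -- max(best, (cnt, credit)) on int pairs: take the new pair iff it is lexicographically greater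
    if best.1 < s.1 ∨ (best.1 = s.1 ∧ best.2 < s.2) then s else best) ((0 : Int), (0 : Int))
  [best.1, best.2]

-- ===== PRECONDITION & SPEC =====
-- Pre_ excludes inputs where some user list has fewer than 2 entries: there Python A (and B)
-- raise IndexError on user[0]/user[1].
def Pre_solution (users : List (List Int)) (emoticons : List Int) : Prop :=
  ∀ u ∈ users, 2 ≤ u.length
instance (users : List (List Int)) (emoticons : List Int) : Decidable (Pre_solution users emoticons) := by unfold Pre_solution; infer_instance

def pvWitness_solution : List (List Int) × List Int := ([[40, 100], [25, 1000]], [100, 150])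

def Spec_solution (users : List (List Int)) (emoticons : List Int) (out : List Int) : Prop := out = solution_alt users emoticons
instance (users : List (List Int)) (emoticons : List Int) (out : List Int) : Decidable (Spec_solution users emoticons out) := by unfold Spec_solution; infer_instance

-- ===== CLAIM (what is proved, stated in full; the proofs are below) =====
def Claim_equal_solution : Prop := ∀ (users : List (List Int)) (emoticons : List Int), Dom_solution users emoticons → Pre_solution users emoticons → Spec_solution users emoticons (solution users emoticons)

-- ===== LEMMAS AND PROOFS =====

-- decode of code k into its discount tuple, most-significant digit first (Nat form of B's comprehension)
def decodeB (f k : Nat) : List Int :=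
  (List.range f).map (fun i => (((k / 4 ^ (f - 1 - i)) % 4 : Nat) : Int) * 10 + 10)

lemma decodeB_length (f k : Nat) : (decodeB f k).length = f := by
  simp [decodeB]

lemma key_div (j r f : Nat) (hr : r < 4 ^ f) : (j * 4 ^ f + r) / 4 ^ f = j := by
  rw [Nat.add_comm, mul_comm, Nat.add_mul_div_left _ _ (Nat.pow_pos (by norm_num)),
      Nat.div_eq_of_lt hr, Nat.zero_add]

lemma key_mod (j r f i : Nat) (hif : i < f) :
    ((j * 4 ^ f + r) / 4 ^ (f - 1 - i)) % 4 = (r / 4 ^ (f - 1 - i)) % 4 := by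
  obtain ⟨e, he⟩ : ∃ e, f - 1 - i = e := ⟨_, rfl⟩
  rw [he]
  rw [show (4 : Nat) ^ f = 4 ^ e * 4 ^ (i + 1) by rw [← pow_add]; congr 1; omega]
  rw [show j * (4 ^ e * 4 ^ (i + 1)) + r = r + 4 ^ e * (j * 4 ^ (i + 1)) by ring]
  rw [Nat.add_mul_div_left _ _ (Nat.pow_pos (by norm_num))]
  rw [pow_succ, show j * (4 ^ i * 4) = (j * 4 ^ i) * 4 by ring]
  rw [Nat.add_mul_mod_self_right]

lemma decodeB_split (f j r : Nat) (hj : j < 4) (hr : r < 4 ^ f) :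
    decodeB (f + 1) (j * 4 ^ f + r) = ((j : Int) * 10 + 10) :: decodeB f r := by
  unfold decodeB
  rw [List.range_succ_eq_map]
  simp only [List.map_cons, List.map_map]
  congr 1
  · rw [show f + 1 - 1 - 0 = f by omega, key_div j r f hr, Nat.mod_eq_of_lt hj]
  · apply List.map_congr_left
    intro i hi
    have hif : i < f := List.mem_range.mp hi
    simp only [Function.comp]
    rw [show f + 1 - 1 - Nat.succ i = f - 1 - i by omega, key_mod j r f i hif]

lemma repPermA_eq (f : Nat) (arr : List Int) :
    repPermA f arr = (List.range (4 ^ f)).map (fun k => arr ++ decodeB f k) := by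
  induction f generalizing arr with
  | zero => simp [repPermA, decodeB]
  | succ f ih =>
    have block : ∀ (c j : Nat), c = j * 4 ^ f → j < 4 →
        ((List.range (4 ^ f)).map (fun r => c + r)).map (fun k => arr ++ decodeB (f + 1) k)
        = (List.range (4 ^ f)).map (fun k => (arr ++ [(j : Int) * 10 + 10]) ++ decodeB f k) := by
      intro c j hc hj
      rw [List.map_map]
      apply List.map_congr_left
      intro r hr
      simp only [Function.comp]
      rw [hc, decodeB_split f j r hj (List.mem_range.mp hr)]
      simp
    have hsplit : List.range (4 ^ (f + 1))
        = List.range (4 ^ f)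
          ++ (List.range (4 ^ f)).map (fun r => 4 ^ f + r)
          ++ (List.range (4 ^ f)).map (fun r => (4 ^ f + 4 ^ f) + r)
          ++ (List.range (4 ^ f)).map (fun r => ((4 ^ f + 4 ^ f) + 4 ^ f) + r) := by
      rw [show 4 ^ (f + 1) = ((4 ^ f + 4 ^ f) + 4 ^ f) + 4 ^ f by ring]
      rw [List.range_add, List.range_add, List.range_add]
    have block0 : (List.range (4 ^ f)).map (fun k => arr ++ decodeB (f + 1) k)
        = (List.range (4 ^ f)).map (fun k => (arr ++ [(0 : Int) * 10 + 10]) ++ decodeB f k) := by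
      have := block 0 0 (by ring) (by norm_num)
      simpa using this
    rw [hsplit]
    simp only [List.map_append]
    rw [block0, block (4 ^ f) 1 (by ring) (by norm_num),
        block (4 ^ f + 4 ^ f) 2 (by ring) (by norm_num),
        block ((4 ^ f + 4 ^ f) + 4 ^ f) 3 (by ring) (by norm_num)]
    simp only [repPermA, List.foldl, List.nil_append]
    rw [ih, ih, ih, ih]
    norm_num

lemma foldl_range_zip {α : Type} (g : α → Int → Int → α) :
    ∀ (xs ys : List Int), ys.length = xs.length → ∀ (a : α),
    (List.range ys.length).foldl (fun acc i => g acc (xs.getD i 0) (ys.getD i 0)) a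
    = (xs.zip ys).foldl (fun acc p => g acc p.1 p.2) a
  | [], [], _, a => by simp
  | x :: xs, y :: ys, h, a => by
      simp only [List.length_cons, List.range_succ_eq_map, List.foldl_cons, List.foldl_map,
        List.getD_cons_zero, List.getD_cons_succ, List.zip_cons_cons]
      exact foldl_range_zip g xs ys (by simpa using h) (g a x y)

lemma foldl_if_sum (dd : Int) (f : Int × Int → Int) :
    ∀ (l : List (Int × Int)) (a : Int),
    l.foldl (fun acc p => if dd ≤ p.2 then acc + f p else acc) a
    = a + ((l.filter (fun p => decide (dd ≤ p.2))).map f).sum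
  | [], a => by simp
  | p :: l, a => by
      by_cases h : dd ≤ p.2
      · rw [List.foldl_cons, if_pos h, foldl_if_sum dd f l,
            List.filter_cons_of_pos (by simpa using h), List.map_cons, List.sum_cons]
        ring
      · rw [List.foldl_cons, if_neg h, foldl_if_sum dd f l,
            List.filter_cons_of_neg (by simpa using h)]

lemma score_eq (em perm : List Int) (h : perm.length = em.length) (dd : Int) :
    (PySem.List.pyRange 0 (perm.length : Int) 1).foldl
      (fun uc i => if dd ≤ PySem.List.pyGetD perm i 0 then
          uc + PySem.Int.floordiv (PySem.List.pyGetD em i 0 * (100 - PySem.List.pyGetD perm i 0)) 100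
        else uc) 0
    = (((em.zip perm).filter (fun ep => decide (dd ≤ ep.2))).map
        (fun ep => PySem.Int.floordiv (ep.1 * (100 - ep.2)) 100)).sum := by
  rw [PySem.List.pyRange_zero_natCast, List.foldl_map]
  simp only [PySem.List.pyGetD_natCast]
  rw [foldl_range_zip (fun acc e p => if dd ≤ p then acc + PySem.Int.floordiv (e * (100 - p)) 100 else acc) em perm h 0]
  rw [foldl_if_sum dd (fun ep => PySem.Int.floordiv (ep.1 * (100 - ep.2)) 100) (em.zip perm) 0]
  simp

lemma perm_decode (n k : Nat) :
    (PySem.List.pyRange 0 (n : Int) 1).map (fun i =>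
      PySem.Int.mod (PySem.Int.floordiv (k : Int) (4 ^ ((n : Int) - 1 - i).toNat)) 4 * 10 + 10)
    = decodeB n k := by
  rw [PySem.List.pyRange_zero_natCast, List.map_map]
  unfold decodeB
  apply List.map_congr_left
  intro i hi
  have hin : i < n := List.mem_range.mp hi
  simp only [Function.comp]
  rw [show (((n : Int) - 1 - (i : Int)).toNat) = n - 1 - i by omega]
  rw [show ((4 : Int) ^ (n - 1 - i)) = ((4 ^ (n - 1 - i) : Nat) : Int) by push_cast; ring]
  rw [PySem.Int.floordiv_natCast]
  rw [show (4 : Int) = ((4 : Nat) : Int) from rfl, PySem.Int.mod_natCast]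

-- B's per-user scoring step (proof helper; identical to the step inside solution_alt)
def scoreB (users : List (List Int)) (em perm : List Int) : Int × Int :=
  users.foldl (fun s user =>
    if PySem.List.pyGetD user 1 0 ≤
        (((em.zip perm).filter (fun ep => PySem.List.pyGetD user 0 0 ≤ ep.2)).map
          (fun ep => PySem.Int.floordiv (ep.1 * (100 - ep.2)) 100)).sum
      then (s.1 + 1, s.2)
      else (s.1, s.2 +
        (((em.zip perm).filter (fun ep => PySem.List.pyGetD user 0 0 ≤ ep.2)).map
          (fun ep => PySem.Int.floordiv (ep.1 * (100 - ep.2)) 100)).sum)) (0, 0)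

def canonical (users : List (List Int)) (em : List Int) : List Int :=
  let L := (List.range (4 ^ em.length)).map (decodeB em.length)
  let best := L.foldl (fun best perm =>
    let s := scoreB users em perm
    if best.1 < s.1 ∨ (best.1 = s.1 ∧ best.2 < s.2) then s else best) (0, 0)
  [best.1, best.2]

lemma usersFold_eq (users : List (List Int)) (em perm : List Int) (h : perm.length = em.length) :
    List.foldl (fun (s : Int × Int) user =>
      if PySem.List.pyGetD user 1 0 ≤
          List.foldl (fun uc i =>
            if PySem.List.pyGetD user 0 0 ≤ PySem.List.pyGetD perm i 0 then
              uc + PySem.Int.floordiv (PySem.List.pyGetD em i 0 * (100 - PySem.List.pyGetD perm i 0)) 100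
            else uc) 0 (PySem.List.pyRange 0 (perm.length : Int) 1)
        then (s.1 + 1, s.2)
        else (s.1, s.2 +
          List.foldl (fun uc i =>
            if PySem.List.pyGetD user 0 0 ≤ PySem.List.pyGetD perm i 0 then
              uc + PySem.Int.floordiv (PySem.List.pyGetD em i 0 * (100 - PySem.List.pyGetD perm i 0)) 100
            else uc) 0 (PySem.List.pyRange 0 (perm.length : Int) 1))) (0, 0) users
    = scoreB users em perm := by
  unfold scoreB
  congr 1
  funext s user
  rw [score_eq em perm h (PySem.List.pyGetD user 0 0)]

lemma fold_pair (score : List Int → Int × Int) :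
    ∀ (l : List (List Int)) (a b : Int),
    List.foldl (fun answer perm =>
        if PySem.List.pyGetD answer 0 0 < (score perm).1 then [(score perm).1, (score perm).2]
        else if PySem.List.pyGetD answer 0 0 = (score perm).1 then
          (if PySem.List.pyGetD answer 1 0 < (score perm).2 then [(score perm).1, (score perm).2] else answer)
        else answer) [a, b] l
    = [(List.foldl (fun best perm =>
          if best.1 < (score perm).1 ∨ (best.1 = (score perm).1 ∧ best.2 < (score perm).2) then score perm else best) (a, b) l).1,
       (List.foldl (fun best perm =>
          if best.1 < (score perm).1 ∨ (best.1 = (score perm).1 ∧ best.2 < (score perm).2) then score perm else best) (a, b) l).2]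
  | [], a, b => by simp
  | p :: l, a, b => by
      simp only [List.foldl_cons]
      have h0 : PySem.List.pyGetD [a, b] 0 0 = a := rfl
      have h1 : PySem.List.pyGetD [a, b] 1 0 = b := rfl
      rw [h0, h1]
      by_cases hlt : a < (score p).1
      · rw [if_pos hlt, if_pos (Or.inl hlt)]
        exact fold_pair score l (score p).1 (score p).2
      · rw [if_neg hlt]
        by_cases heq : a = (score p).1
        · rw [if_pos heq]
          by_cases hb : b < (score p).2
          · rw [if_pos hb, if_pos (Or.inr ⟨heq, hb⟩)]
            exact fold_pair score l (score p).1 (score p).2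
          · rw [if_neg hb, if_neg (by omega)]
            exact fold_pair score l a b
        · rw [if_neg heq, if_neg (by omega)]
          exact fold_pair score l a b

lemma A_char (users : List (List Int)) (em : List Int) :
    solution users em = canonical users em := by
  simp only [solution, canonical]
  rw [repPermA_eq]
  simp only [List.nil_append]
  rw [PySem.List.foldl_congr_mem (h := ?_)]
  · exact fold_pair (scoreB users em) ((List.range (4 ^ em.length)).map (decodeB em.length)) 0 0
  · intro acc perm hmem
    obtain ⟨k, _, rfl⟩ := List.mem_map.mp hmem
    rw [usersFold_eq users em (decodeB em.length k) (decodeB_length em.length k)]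

lemma B_char (users : List (List Int)) (em : List Int) :
    solution_alt users em = canonical users em := by
  simp only [solution_alt, canonical, scoreB, Int.toNat_natCast]
  rw [show ((4 : Int) ^ em.length) = ((4 ^ em.length : Nat) : Int) by push_cast; ring]
  rw [PySem.List.pyRange_zero_natCast (4 ^ em.length), List.foldl_map]
  simp only [perm_decode]
  rw [List.foldl_map]

theorem solution_spec : Claim_equal_solution := by
  intro users emoticons _hdom _hpre
  unfold Spec_solution
  rw [A_char, B_char]
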